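-- pv_equiv track=rewrite | github.com/hpicsk/hc-net | experiments/efficiency_analysis.py | estimate_model_flops
-- ===== SOURCE A (Python) =====
-- def estimate_flops_linear(in_features: int, out_features: int, batch_size: int = 1) -> int:
--     """Estimate FLOPs for a linear layer (multiply-add)."""
--     return 2 * batch_size * in_features * out_features
--
-- def estimate_flops_attention(seq_len: int, hidden_dim: int, n_heads: int, batch_size: int = 1) -> int:
--     """Estimate FLOPs for multi-head attention."""
--     # Q, K, V projections
--     qkv_flops = 3 * estimate_flops_linear(hidden_dim, hidden_dim, batch_size * seq_len)
--     # Attention scores: Q @ K^T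
--     score_flops = batch_size * n_heads * seq_len * seq_len * (hidden_dim // n_heads)
--     # Softmax (approximate)
--     softmax_flops = batch_size * n_heads * seq_len * seq_len * 5
--     # Attention @ V
--     attn_flops = batch_size * n_heads * seq_len * seq_len * (hidden_dim // n_heads)
--     # Output projection
--     out_flops = estimate_flops_linear(hidden_dim, hidden_dim, batch_size * seq_len)
--
--     return qkv_flops + score_flops + softmax_flops + attn_flops + out_flops
--
-- def estimate_model_flops(
--     model_name: str,
--     n_particles: int,
--     hidden_dim: int,
--     n_layers: int,
--     batch_size: int,
--     coord_dim: int = 2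
-- ) -> int:
--     """
--     Estimate FLOPs for a model.
--
--     This is a rough estimation based on model architecture.
--     """
--     input_dim = coord_dim * 2  # pos + vel
--
--     # Input projection
--     flops = estimate_flops_linear(input_dim, hidden_dim, batch_size * n_particles)
--
--     # Processing layers
--     for _ in range(n_layers):
--         # MLP (fc1 + fc2)
--         flops += estimate_flops_linear(hidden_dim, hidden_dim * 2, batch_size * n_particles)
--         flops += estimate_flops_linear(hidden_dim * 2, hidden_dim, batch_size * n_particles)
--
--         # Model-specific operations
--         if model_name in ['hcnet', 'hcnet3d']:
--             # Geometric mixing: outer product + projection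
--             group_size = 8 if model_name == 'hcnet3d' else 4
--             n_groups = hidden_dim // group_size
--             # Outer product
--             flops += batch_size * n_particles * n_groups * group_size * group_size
--             # Projection
--             flops += batch_size * n_particles * n_groups * group_size * group_size * group_size
--
--         elif model_name in ['egnn', 'egnn3d']:
--             # Pairwise distance computation
--             flops += batch_size * n_particles * n_particles * coord_dim * 3
--             # Edge MLP
--             edge_input_dim = hidden_dim * 2 + 1
--             flops += estimate_flops_linear(edge_input_dim, hidden_dim, batch_size * n_particles * n_particles)
--
--         elif model_name in ['cgenn', 'cgenn3d']:
--             # Multivector operations (simplified)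
--             mv_dim = 16  # Cl(4,0)
--             flops += batch_size * n_particles * hidden_dim * mv_dim * 2
--
--         elif model_name in ['nequip', 'nequip3d']:
--             # Radial basis + angular encoding
--             n_radial = 8
--             n_angular = 9
--             flops += batch_size * n_particles * n_particles * (n_radial + n_angular)
--             # Edge network
--             edge_input_dim = hidden_dim * 2 + n_radial + n_angular
--             flops += estimate_flops_linear(edge_input_dim, hidden_dim, batch_size * n_particles * n_particles)
--
--     # Attention (if applicable)
--     if model_name not in ['cgenn', 'cgenn3d']:
--         flops += estimate_flops_attention(n_particles, hidden_dim, 4, batch_size)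
--
--     # Output projection
--     flops += estimate_flops_linear(hidden_dim, input_dim, batch_size * n_particles)
--
--     return flops
-- ===== SOURCE B (Python) =====
-- def estimate_model_flops(
--     model_name: str,
--     n_particles: int,
--     hidden_dim: int,
--     n_layers: int,
--     batch_size: int,
--     coord_dim: int = 2
-- ) -> int:
--     """Closed-form FLOP estimate: the per-layer cost is constant, so compute it
--     once and multiply by the number of layers instead of looping."""
--     bp = batch_size * n_particles
--     input_dim = coord_dim * 2
--
--     # per-layer cost (fc1 + fc2 have equal cost: 4 * bp * hidden_dim^2 each)
--     per_layer = 8 * bp * hidden_dim * hidden_dim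
--     if model_name in ('hcnet', 'hcnet3d'):
--         g = 8 if model_name == 'hcnet3d' else 4
--         per_layer += bp * (hidden_dim // g) * g * g * (1 + g)
--     elif model_name in ('egnn', 'egnn3d'):
--         per_layer += bp * n_particles * (coord_dim * 3 + 2 * (hidden_dim * 2 + 1) * hidden_dim)
--     elif model_name in ('cgenn', 'cgenn3d'):
--         per_layer += bp * hidden_dim * 32
--     elif model_name in ('nequip', 'nequip3d'):
--         per_layer += bp * n_particles * (17 + 2 * (hidden_dim * 2 + 17) * hidden_dim)
--
--     total = 2 * bp * input_dim * hidden_dim            # input projection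
--     total += max(n_layers, 0) * per_layer              # all processing layers at once
--     if model_name not in ('cgenn', 'cgenn3d'):         # attention, closed form
--         total += (8 * batch_size * n_particles * hidden_dim * hidden_dim
--                   + 8 * batch_size * n_particles * n_particles * (hidden_dim // 4)
--                   + 20 * batch_size * n_particles * n_particles)
--     total += 2 * bp * hidden_dim * input_dim           # output projection
--     return total
-- ===== Notes on version B (the rewrite author's own statement) =====
-- stated objective: faster
-- what changed: Replaced the per-layer loop by computing the constant per-layer FLOP cost once and multiplying by max(n_layers, 0), with the attention cost folded into a closed form.
import Mathlib
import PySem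

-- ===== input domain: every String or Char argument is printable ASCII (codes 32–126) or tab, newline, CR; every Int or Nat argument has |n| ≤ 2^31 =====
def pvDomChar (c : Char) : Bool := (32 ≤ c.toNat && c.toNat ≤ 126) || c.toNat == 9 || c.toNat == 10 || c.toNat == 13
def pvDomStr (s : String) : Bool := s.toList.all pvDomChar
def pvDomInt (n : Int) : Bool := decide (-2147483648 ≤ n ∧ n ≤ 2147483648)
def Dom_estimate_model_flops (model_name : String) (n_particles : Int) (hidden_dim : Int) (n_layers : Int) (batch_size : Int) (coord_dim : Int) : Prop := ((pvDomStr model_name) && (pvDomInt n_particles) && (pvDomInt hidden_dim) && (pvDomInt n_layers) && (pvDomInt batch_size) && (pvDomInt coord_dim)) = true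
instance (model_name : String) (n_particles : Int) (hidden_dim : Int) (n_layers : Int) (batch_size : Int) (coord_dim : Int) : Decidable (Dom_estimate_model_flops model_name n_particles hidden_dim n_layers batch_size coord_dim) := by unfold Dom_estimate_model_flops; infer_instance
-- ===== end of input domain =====

-- B replaces A's per-layer loop by computing the (constant) per-layer cost once and
-- multiplying by the number of layers (closed form; objective: faster).

-- ===== PORT A =====
def estimate_flops_linear (in_features : Int) (out_features : Int) (batch_size : Int) : Int :=
  2 * batch_size * in_features * out_features

def estimate_flops_attention (seq_len : Int) (hidden_dim : Int) (n_heads : Int) (batch_size : Int) : Int :=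
  let qkv_flops := 3 * estimate_flops_linear hidden_dim hidden_dim (batch_size * seq_len)
  let score_flops := batch_size * n_heads * seq_len * seq_len * (PySem.Int.floordiv hidden_dim n_heads)
  let softmax_flops := batch_size * n_heads * seq_len * seq_len * 5
  let attn_flops := batch_size * n_heads * seq_len * seq_len * (PySem.Int.floordiv hidden_dim n_heads)
  let out_flops := estimate_flops_linear hidden_dim hidden_dim (batch_size * seq_len)
  qkv_flops + score_flops + softmax_flops + attn_flops + out_flops

def estimate_model_flops (model_name : String) (n_particles : Int) (hidden_dim : Int) (n_layers : Int) (batch_size : Int) (coord_dim : Int) : Int :=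
  let input_dim := coord_dim * 2
  let flops := estimate_flops_linear input_dim hidden_dim (batch_size * n_particles)
  let flops := (PySem.List.pyRange 0 n_layers 1).foldl (fun flops _ =>
    let flops := flops + estimate_flops_linear hidden_dim (hidden_dim * 2) (batch_size * n_particles)
    let flops := flops + estimate_flops_linear (hidden_dim * 2) hidden_dim (batch_size * n_particles)
    if model_name = "hcnet" ∨ model_name = "hcnet3d" then
      let group_size : Int := if model_name = "hcnet3d" then 8 else 4
      let n_groups := PySem.Int.floordiv hidden_dim group_size
      let flops := flops + batch_size * n_particles * n_groups * group_size * group_size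
      flops + batch_size * n_particles * n_groups * group_size * group_size * group_size
    else if model_name = "egnn" ∨ model_name = "egnn3d" then
      let flops := flops + batch_size * n_particles * n_particles * coord_dim * 3
      let edge_input_dim := hidden_dim * 2 + 1
      flops + estimate_flops_linear edge_input_dim hidden_dim (batch_size * n_particles * n_particles)
    else if model_name = "cgenn" ∨ model_name = "cgenn3d" then
      let mv_dim : Int := 16
      flops + batch_size * n_particles * hidden_dim * mv_dim * 2
    else if model_name = "nequip" ∨ model_name = "nequip3d" then
      let n_radial : Int := 8
      let n_angular : Int := 9
      let flops := flops + batch_size * n_particles * n_particles * (n_radial + n_angular)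
      let edge_input_dim := hidden_dim * 2 + n_radial + n_angular
      flops + estimate_flops_linear edge_input_dim hidden_dim (batch_size * n_particles * n_particles)
    else flops) flops
  let flops := if ¬ (model_name = "cgenn" ∨ model_name = "cgenn3d") then
      flops + estimate_flops_attention n_particles hidden_dim 4 batch_size
    else flops
  flops + estimate_flops_linear hidden_dim input_dim (batch_size * n_particles)

-- ===== PORT B =====
def estimate_model_flops_alt (model_name : String) (n_particles : Int) (hidden_dim : Int) (n_layers : Int) (batch_size : Int) (coord_dim : Int) : Int :=
  let bp := batch_size * n_particles
  let input_dim := coord_dim * 2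
  let per_layer := 8 * bp * hidden_dim * hidden_dim
  let per_layer :=
    if model_name = "hcnet" ∨ model_name = "hcnet3d" then
      let g : Int := if model_name = "hcnet3d" then 8 else 4
      per_layer + bp * (PySem.Int.floordiv hidden_dim g) * g * g * (1 + g)
    else if model_name = "egnn" ∨ model_name = "egnn3d" then
      per_layer + bp * n_particles * (coord_dim * 3 + 2 * (hidden_dim * 2 + 1) * hidden_dim)
    else if model_name = "cgenn" ∨ model_name = "cgenn3d" then
      per_layer + bp * hidden_dim * 32
    else if model_name = "nequip" ∨ model_name = "nequip3d" then
      per_layer + bp * n_particles * (17 + 2 * (hidden_dim * 2 + 17) * hidden_dim)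
    else per_layer
  let total := 2 * bp * input_dim * hidden_dim
  let total := total + max n_layers 0 * per_layer
  let total := if ¬ (model_name = "cgenn" ∨ model_name = "cgenn3d") then
      total + (8 * batch_size * n_particles * hidden_dim * hidden_dim
               + 8 * batch_size * n_particles * n_particles * (PySem.Int.floordiv hidden_dim 4)
               + 20 * batch_size * n_particles * n_particles)
    else total
  total + 2 * bp * hidden_dim * input_dim

-- ===== PRECONDITION & SPEC =====
def Spec_estimate_model_flops (model_name : String) (n_particles : Int) (hidden_dim : Int) (n_layers : Int) (batch_size : Int) (coord_dim : Int) (out : Int) : Prop := out = estimate_model_flops_alt model_name n_particles hidden_dim n_layers batch_size coord_dim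
instance (model_name : String) (n_particles : Int) (hidden_dim : Int) (n_layers : Int) (batch_size : Int) (coord_dim : Int) (out : Int) : Decidable (Spec_estimate_model_flops model_name n_particles hidden_dim n_layers batch_size coord_dim out) := by unfold Spec_estimate_model_flops; infer_instance

-- ===== CLAIM (what is proved, stated in full; the proofs are below) =====
def Claim_equal_estimate_model_flops : Prop := ∀ (model_name : String) (n_particles : Int) (hidden_dim : Int) (n_layers : Int) (batch_size : Int) (coord_dim : Int), Dom_estimate_model_flops model_name n_particles hidden_dim n_layers batch_size coord_dim → Spec_estimate_model_flops model_name n_particles hidden_dim n_layers batch_size coord_dim (estimate_model_flops model_name n_particles hidden_dim n_layers batch_size coord_dim)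

-- ===== LEMMAS AND PROOFS =====

/-- Folding a step that adds a fixed amount `c` per element just adds `length * c`. -/
theorem foldl_const_step {α : Type} (f : Int → α → Int) (c : Int) (hf : ∀ s x, f s x = s + c) :
    ∀ (l : List α) (init : Int), l.foldl f init = init + l.length * c := by
  intro l
  induction l with
  | nil => intro init; simp
  | cons x xs ih =>
      intro init
      rw [List.foldl_cons, hf, ih]
      simp only [List.length_cons]
      push_cast
      ring

theorem estimate_model_flops_eq_alt (model_name : String) (n_particles : Int) (hidden_dim : Int) (n_layers : Int) (batch_size : Int) (coord_dim : Int) :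
    estimate_model_flops model_name n_particles hidden_dim n_layers batch_size coord_dim
      = estimate_model_flops_alt model_name n_particles hidden_dim n_layers batch_size coord_dim := by
  unfold estimate_model_flops estimate_model_flops_alt estimate_flops_attention estimate_flops_linear
  dsimp only
  rw [foldl_const_step _
      (2 * (batch_size * n_particles) * hidden_dim * (hidden_dim * 2)
        + 2 * (batch_size * n_particles) * (hidden_dim * 2) * hidden_dim
        + (if model_name = "hcnet" ∨ model_name = "hcnet3d" then
             batch_size * n_particles
               * PySem.Int.floordiv hidden_dim (if model_name = "hcnet3d" then 8 else 4)
               * (if model_name = "hcnet3d" then 8 else 4) * (if model_name = "hcnet3d" then 8 else 4)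
               * (1 + (if model_name = "hcnet3d" then (8:Int) else 4))
           else if model_name = "egnn" ∨ model_name = "egnn3d" then
             batch_size * n_particles * n_particles * coord_dim * 3
               + 2 * (batch_size * n_particles * n_particles) * (hidden_dim * 2 + 1) * hidden_dim
           else if model_name = "cgenn" ∨ model_name = "cgenn3d" then
             batch_size * n_particles * hidden_dim * 32
           else if model_name = "nequip" ∨ model_name = "nequip3d" then
             batch_size * n_particles * n_particles * 17
               + 2 * (batch_size * n_particles * n_particles) * (hidden_dim * 2 + 17) * hidden_dim
           else 0))
      (by intro s x; split_ifs <;> ring)]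
  simp only [PySem.List.length_pyRange_one, Int.ofNat_toNat, sub_zero]
  split_ifs <;> ring

-- ===== VERDICT (by name: the statement is the Claim_ definition above) =====
theorem estimate_model_flops_spec : Claim_equal_estimate_model_flops := by
  unfold Claim_equal_estimate_model_flops Spec_estimate_model_flops
  intro m a b c d e _
  exact estimate_model_flops_eq_alt m a b c d e
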